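-- pv_equiv track=rewrite | github.com/nakanoh8/work | 210115/benkyoukai/quiz/kaibunsu_ng.py | toNishinsu
-- ===== SOURCE A (Python) =====
-- def toNishinsu(jusshinsu):
--     nishinsu = 0
--     nishinsuCounter = -1
--     i = -1
--     while nishinsuCounter < jusshinsu:
--         i += 1
--         if isNishinsu(i):
--             nishinsuCounter += 1
--             nishinsu = i
--     return nishinsu
--
-- def isNishinsu(num):
--     for aChar in list(str(num)):
--         if int(aChar) >= 2:
--             return False
--     return True
-- ===== SOURCE B (Python) =====
-- def toNishinsu(jusshinsu):
--     # The k-th (0-indexed) number whose decimal digits are all 0/1 is the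
--     # decimal reading of k's binary representation; build it digit by digit.
--     if jusshinsu <= 0:
--         return 0
--     result, place, n = 0, 1, jusshinsu
--     while n > 0:
--         result += (n % 2) * place
--         place *= 10
--         n //= 2
--     return result
-- ===== Notes on version B (the rewrite author's own statement) =====
-- stated objective: faster
-- what changed: A searches upward through every integer, testing each one's decimal digit string, until it has counted enough digit-restricted numbers; B performs no search at all and builds the answer directly by emitting the argument's binary digits as decimal digits.
import Mathlib
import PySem

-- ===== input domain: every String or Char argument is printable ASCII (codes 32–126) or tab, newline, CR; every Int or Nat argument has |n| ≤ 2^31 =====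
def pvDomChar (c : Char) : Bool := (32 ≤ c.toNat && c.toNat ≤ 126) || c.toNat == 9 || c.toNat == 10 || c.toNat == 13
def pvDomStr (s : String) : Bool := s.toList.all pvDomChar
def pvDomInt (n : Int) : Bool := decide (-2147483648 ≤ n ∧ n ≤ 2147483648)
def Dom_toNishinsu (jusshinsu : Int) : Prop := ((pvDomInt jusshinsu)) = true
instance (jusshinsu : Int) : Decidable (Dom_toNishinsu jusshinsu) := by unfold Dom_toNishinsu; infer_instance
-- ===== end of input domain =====

-- B replaces A's scan over every integer below the answer (exponential in the input)
-- by reading the input's binary digits into a decimal number (logarithmic); return value only.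

-- ===== PORT A =====

-- int(aChar): exact for the decimal-digit characters produced by str(num) for num ≥ 0,
-- the only characters A's isNishinsu ever reads (isNishinsu is only called on i ≥ 0).
def digitVal (c : Char) : Int := (c.toNat : Int) - 48

-- isNishinsu: the for-loop with early `return False` is `List.all`.
def isNishinsuL (num : Int) : Bool :=
  (PySem.Int.toStr num).toList.all (fun c => !(decide (2 ≤ digitVal c)))

-- `leOne n`: all decimal digits of n are ≤ 1 (proof-side mirror of isNishinsu, used only
-- to establish termination of the while-loop and in the proofs below).
def leOne (n : Nat) : Bool :=
  decide (n % 10 < 2) && (if n / 10 = 0 then true else leOne (n / 10))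
termination_by n
decreasing_by omega

-- `f k`: decimal reading of k's binary representation (the k-th all-0/1 number).
def f (n : Nat) : Nat := if n = 0 then 0 else 10 * f (n / 2) + n % 2
termination_by n
decreasing_by omega

theorem le_f (n : Nat) : n ≤ f n := by
  induction n using Nat.strong_induction_on with
  | _ n ih =>
    rw [f]
    split
    · omega
    · have h2 : n / 2 < n := by omega
      have := ih (n / 2) h2
      omega

theorem digitVal_digitChar (d : Nat) (hd : d < 10) :
    (!(decide (2 ≤ digitVal (Nat.digitChar d)))) = decide (d < 2) := by
  interval_cases d <;> decide

theorem toDigitsCore_all (fuel : Nat) : ∀ (n : Nat) (acc : List Char), n < 10 ^ fuel →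
    (Nat.toDigitsCore 10 fuel n acc).all (fun c => !(decide (2 ≤ digitVal c)))
      = (leOne n && acc.all (fun c => !(decide (2 ≤ digitVal c)))) := by
  induction fuel with
  | zero =>
    intro n acc h
    have : n = 0 := by omega
    subst this
    rw [leOne]
    simp [Nat.toDigitsCore]
  | succ fuel ih =>
    intro n acc h
    rw [Nat.toDigitsCore]
    rw [leOne]
    by_cases h0 : n / 10 = 0
    · simp only [h0, if_true]
      rw [List.all_cons, digitVal_digitChar _ (by omega)]
      simp [Bool.and_comm]
    · simp only [if_neg h0]
      rw [ih (n / 10) _ (by omega)]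
      rw [List.all_cons, digitVal_digitChar _ (by omega)]
      rw [Bool.and_left_comm, Bool.and_assoc]

theorem isNishinsuL_natCast (n : Nat) : isNishinsuL (n : Int) = leOne n := by
  rw [isNishinsuL, PySem.Int.toList_toStr, PySem.Int.toChars]
  have : ¬ ((n : Int) < 0) := by omega
  rw [if_neg this]
  have ht : (n : Int).toNat = n := by omega
  rw [ht, Nat.toDigits]
  rw [toDigitsCore_all (n + 1) n [] (by
    calc n < 10 ^ n := Nat.lt_pow_self (by omega)
    _ ≤ 10 ^ (n + 1) := Nat.pow_le_pow_right (by omega) (by omega))]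
  simp

theorem leOne_f (k : Nat) : leOne (f k) = true := by
  induction k using Nat.strong_induction_on with
  | _ k ih =>
    by_cases hk : k = 0
    · subst hk; rw [f]; simp [leOne]
    · rw [f, if_neg hk]
      have hmod : (10 * f (k / 2) + k % 2) % 10 = k % 2 := by omega
      have hdiv : (10 * f (k / 2) + k % 2) / 10 = f (k / 2) := by omega
      rw [leOne, hmod, hdiv]
      have : decide (k % 2 < 2) = true := by simp; omega
      rw [this]
      split
      · rfl
      · rw [ih (k / 2) (by omega)]
        rfl

-- existence of an all-0/1 number ≥ any starting point (for the loop's termination measure)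
theorem exNext (i : Int) : ∃ m : Nat, isNishinsuL (i + 1 + m) = true := by
  refine ⟨((f (i + 1).toNat : Int) - (i + 1)).toNat, ?_⟩
  have h1 : (i + 1) ≤ (f (i + 1).toNat : Int) := by
    have := le_f (i + 1).toNat
    omega
  have h2 : i + 1 + (((f (i + 1).toNat : Int) - (i + 1)).toNat : Int) = (f (i + 1).toNat : Int) := by
    omega
  rw [h2, isNishinsuL_natCast, leOne_f]

-- distance from i+1 to the next all-0/1 number (termination measure only)
def nextGap (i : Int) : Nat := Nat.find (exNext i)

theorem nextGap_succ_lt (i : Int) (h : isNishinsuL (i + 1) = false) :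
    nextGap (i + 1) < nextGap i := by
  unfold nextGap
  have hspec := Nat.find_spec (exNext i)
  set m0 := Nat.find (exNext i) with hm0
  have hpos : 0 < m0 := by
    rcases Nat.eq_zero_or_pos m0 with h0 | h0
    · rw [h0] at hspec; simp at hspec; rw [hspec] at h; simp at h
    · exact h0
  have : isNishinsuL (i + 1 + 1 + ((m0 - 1 : Nat) : Int)) = true := by
    have : i + 1 + 1 + ((m0 - 1 : Nat) : Int) = i + 1 + (m0 : Int) := by omega
    rw [this]; exact hspec
  have hle : Nat.find (exNext (i + 1)) ≤ m0 - 1 := Nat.find_le this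
  omega

-- the while-loop of A, state (nishinsu, nishinsuCounter, i), body in Python's order
def loopA (jusshinsu nishinsu nishinsuCounter i : Int) : Int :=
  if nishinsuCounter < jusshinsu then
    if isNishinsuL (i + 1) then
      loopA jusshinsu (i + 1) (nishinsuCounter + 1) (i + 1)
    else
      loopA jusshinsu nishinsu nishinsuCounter (i + 1)
  else nishinsu
termination_by ((jusshinsu - nishinsuCounter).toNat, nextGap i)
decreasing_by
  · apply Prod.Lex.left; omega
  · apply Prod.Lex.right; apply nextGap_succ_lt; simp_all

def toNishinsu (jusshinsu : Int) : Int := loopA jusshinsu 0 (-1) (-1)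

-- ===== PORT B =====

-- the while-loop of B, state (result, place, n)
def loopB (n result place : Int) : Int :=
  if 0 < n then
    loopB (PySem.Int.floordiv n 2) (result + PySem.Int.mod n 2 * place) (place * 10)
  else result
termination_by n.toNat
decreasing_by
  have := PySem.Int.floordiv_eq_ediv_of_pos (a := n) (b := 2) (by omega)
  omega

def toNishinsu_alt (jusshinsu : Int) : Int :=
  if jusshinsu ≤ 0 then 0
  else loopB jusshinsu 0 1

-- ===== PRECONDITION & SPEC =====
def Spec_toNishinsu (jusshinsu : Int) (out : Int) : Prop := out = toNishinsu_alt jusshinsu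
instance (jusshinsu : Int) (out : Int) : Decidable (Spec_toNishinsu jusshinsu out) := by unfold Spec_toNishinsu; infer_instance

-- ===== CLAIM (what is proved, stated in full; the proofs are below) =====
def Claim_equal_toNishinsu : Prop := ∀ (jusshinsu : Int), Dom_toNishinsu jusshinsu → Spec_toNishinsu jusshinsu (toNishinsu jusshinsu)

-- ===== LEMMAS AND PROOFS =====

theorem f_zero : f 0 = 0 := by rw [f]; rfl

theorem f_one : f 1 = 1 := by rw [f]; norm_num [f_zero]

theorem f_succ (n : Nat) (h : n ≠ 0) : f n = 10 * f (n / 2) + n % 2 := by rw [f, if_neg h]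


theorem f_lt_succ (n : Nat) : f n < f (n + 1) := by
  induction n using Nat.strong_induction_on with
  | _ n ih =>
    by_cases hn : n = 0
    · subst hn; rw [f_zero, f_one]; omega
    · rcases Nat.even_or_odd n with he | ho
      · -- n even: (n+1)/2 = n/2, digits differ in last bit
        have h2 : n % 2 = 0 := Nat.even_iff.mp he
        have hd : (n + 1) / 2 = n / 2 := by omega
        have hm : (n + 1) % 2 = 1 := by omega
        rw [f_succ n hn, f_succ (n + 1) (by omega), hd, hm, h2]
        omega
      · have h2 : n % 2 = 1 := Nat.odd_iff.mp ho
        have hd : (n + 1) / 2 = n / 2 + 1 := by omega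
        have hm : (n + 1) % 2 = 0 := by omega
        have hih := ih (n / 2) (by omega)
        rw [f_succ n hn, f_succ (n + 1) (by omega), hd, hm, h2]
        omega

theorem f_strictMono : StrictMono f := strictMono_nat_of_lt_succ f_lt_succ

theorem f_finv (m : Nat) (h : leOne m = true) : ∃ k, f k = m := by
  induction m using Nat.strong_induction_on with
  | _ m ih =>
    by_cases hm : m = 0
    · exact ⟨0, by rw [hm]; exact f_zero⟩
    · rw [leOne] at h
      have hmod : m % 10 < 2 := by
        by_contra hc
        simp only [Bool.and_eq_true, decide_eq_true_eq] at h
        omega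
      by_cases h0 : m / 10 = 0
      · -- m < 10 and m % 10 < 2, m ≠ 0 → m = 1 = f 1
        have : m = 1 := by omega
        exact ⟨1, by rw [this]; exact f_one⟩
      · have hrec : leOne (m / 10) = true := by
          rw [if_neg h0] at h
          simp only [Bool.and_eq_true] at h
          exact h.2
        obtain ⟨k', hk'⟩ := ih (m / 10) (by omega) hrec
        refine ⟨2 * k' + m % 10, ?_⟩
        have hne : 2 * k' + m % 10 ≠ 0 := by
          rcases Nat.eq_zero_or_pos k' with h0' | h0'
          · subst h0'; rw [f_zero] at hk'; omega
          · omega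
        rw [f_succ _ hne]
        have hd : (2 * k' + m % 10) / 2 = k' := by omega
        have hm2 : (2 * k' + m % 10) % 2 = m % 10 := by omega
        rw [hd, hm2, hk']
        omega

theorem no_between (cn : Nat) (m : Nat) (h1 : f cn < m) (h2 : m < f (cn + 1)) :
    leOne m = false := by
  by_contra hc
  simp only [Bool.not_eq_false] at hc
  obtain ⟨k, hk⟩ := f_finv m hc
  subst hk
  have := f_strictMono.lt_iff_lt.mp h1
  have := f_strictMono.lt_iff_lt.mp h2
  omega

-- inner: from i strictly between f cn - 1 and f (cn+1), the loop scans up to the next hit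
theorem loopA_inner (gap : Nat) : ∀ (j nish : Int) (cn : Nat) (i : Int),
    (cn : Int) < j → i = (f (cn + 1) : Int) - 1 - gap → (f cn : Int) ≤ i →
    loopA j nish cn i = loopA j (f (cn + 1)) (cn + 1) (f (cn + 1)) := by
  induction gap with
  | zero =>
    intro j nish cn i hj hi hlo
    rw [loopA, if_pos hj]
    have hi1 : i + 1 = (f (cn + 1) : Int) := by omega
    rw [hi1, isNishinsuL_natCast, leOne_f]
    simp
  | succ gap ih =>
    intro j nish cn i hj hi hlo
    rw [loopA, if_pos hj]
    have hnat : i + 1 = (((i + 1).toNat : Nat) : Int) := by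
      have : (0 : Int) ≤ f cn := by positivity
      omega
    have hmid : f cn < (i + 1).toNat ∧ (i + 1).toNat < f (cn + 1) := by omega
    have hfalse : isNishinsuL (i + 1) = false := by
      rw [hnat, isNishinsuL_natCast]
      exact no_between cn _ hmid.1 hmid.2
    rw [hfalse]
    simp only [Bool.false_eq_true, if_false]
    exact ih j nish cn (i + 1) hj (by omega) (by omega)

theorem loopA_outer (dj : Nat) : ∀ (cn : Nat) (j : Int), j = (cn : Int) + dj →
    loopA j (f cn) cn (f cn) = f (cn + dj) := by
  induction dj with
  | zero =>
    intro cn j hj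
    rw [loopA, if_neg (by omega)]
    norm_num
  | succ dj ih =>
    intro cn j hj
    have hj' : (cn : Int) < j := by omega
    have hlt := f_lt_succ cn
    rw [loopA_inner (f (cn + 1) - 1 - f cn) j (f cn) cn (f cn) hj' (by omega) (by omega)]
    have hih := ih (cn + 1) j (by omega)
    have hcast : ((cn + 1 : Nat) : Int) = (cn : Int) + 1 := by push_cast; ring
    rw [hcast] at hih
    rw [show cn + 1 + dj = cn + (dj + 1) from by omega] at hih
    exact hih

theorem loopB_eq (nn : Nat) : ∀ (res place : Int),
    loopB (nn : Int) res place = res + place * f nn := by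
  induction nn using Nat.strong_induction_on with
  | _ nn ih =>
    intro res place
    by_cases hn : nn = 0
    · subst hn; rw [loopB]; simp [f_zero]
    · rw [loopB, if_pos (by omega)]
      have hfd : PySem.Int.floordiv (nn : Int) 2 = ((nn / 2 : Nat) : Int) := by
        exact_mod_cast PySem.Int.floordiv_natCast nn 2
      have hmd : PySem.Int.mod (nn : Int) 2 = ((nn % 2 : Nat) : Int) := by
        exact_mod_cast PySem.Int.mod_natCast nn 2
      rw [hfd, hmd, ih (nn / 2) (by omega), f_succ nn hn]
      push_cast
      ring

-- ===== VERDICT (by name: the statement is the Claim_ definition above) =====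
theorem toNishinsu_spec : Claim_equal_toNishinsu := by
  intro j _
  unfold Spec_toNishinsu toNishinsu toNishinsu_alt
  by_cases hneg : j < 0
  · -- guard -1 < j fails at once; B returns 0
    rw [loopA, if_neg (by omega), if_pos (by omega)]
  · have hstart : loopA j 0 (-1) (-1) = f j.toNat := by
      rw [loopA, if_pos (by omega)]
      have h01 : (-1 : Int) + 1 = ((0 : Nat) : Int) := by norm_num
      rw [h01, isNishinsuL_natCast]
      have hl0 : leOne 0 = true := by have h := leOne_f 0; rwa [f_zero] at h
      rw [hl0]
      simp only [if_true]
      have hout := loopA_outer j.toNat 0 j (by omega)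
      simp only [f_zero, Nat.zero_add, Nat.cast_zero] at hout ⊢
      exact hout
    by_cases h0 : j ≤ 0
    · have : j = 0 := by omega
      subst this
      rw [if_pos (le_refl 0), hstart]
      norm_num [f_zero]
    · rw [if_neg h0, hstart]
      have hb := loopB_eq j.toNat 0 1
      rw [show ((j.toNat : Nat) : Int) = j from by omega] at hb
      rw [hb]
      ring
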